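-- pv_equiv track=rewrite | github.com/haowern98/automation | src/processors/gsn_vs_er_extractor.py | format_date_for_worksheet_name
-- ===== SOURCE A (Python) =====
-- def format_date_for_worksheet_name(date_range_str):
--     """
--     Format date range for worksheet name
--
--     Args:
--         date_range_str (str): Date range string (e.g., '2-3 June 2025')
--
--     Returns:
--         str: Formatted date for worksheet (e.g., '2-3 Jun 2025')
--     """
--     # Convert full month names to abbreviated versions for worksheet names
--     month_abbreviations = {
--         'January': 'Jan', 'February': 'Feb', 'March': 'Mar', 'April': 'Apr',
--         'May': 'May', 'June': 'Jun', 'July': 'Jul', 'August': 'Aug',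
--         'September': 'Sep', 'October': 'Oct', 'November': 'Nov', 'December': 'Dec'
--     }
--
--     formatted_date = date_range_str
--     for full_month, abbrev_month in month_abbreviations.items():
--         formatted_date = formatted_date.replace(full_month, abbrev_month)
--
--     return formatted_date
-- ===== SOURCE B (Python) =====
-- def format_date_for_worksheet_name(date_range_str):
--     """Single left-to-right scan: at each position replace the first matching
--     full month name by its abbreviation, instead of 12 separate replace passes."""
--     month_abbreviations = {
--         'January': 'Jan', 'February': 'Feb', 'March': 'Mar', 'April': 'Apr',
--         'May': 'May', 'June': 'Jun', 'July': 'Jul', 'August': 'Aug',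
--         'September': 'Sep', 'October': 'Oct', 'November': 'Nov', 'December': 'Dec'
--     }
--     out = []
--     i = 0
--     n = len(date_range_str)
--     while i < n:
--         for full, abbrev in month_abbreviations.items():
--             if date_range_str.startswith(full, i):
--                 out.append(abbrev)
--                 i += len(full)
--                 break
--         else:
--             out.append(date_range_str[i])
--             i += 1
--     return ''.join(out)
-- ===== Notes on version B (the rewrite author's own statement) =====
-- stated objective: alternative
-- what changed: Replaces twelve sequential whole-string str.replace passes by one left-to-right scan that at each position substitutes the first matching full month name; correctness uses that no month name overlaps or prefixes another.
import Mathlib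
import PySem

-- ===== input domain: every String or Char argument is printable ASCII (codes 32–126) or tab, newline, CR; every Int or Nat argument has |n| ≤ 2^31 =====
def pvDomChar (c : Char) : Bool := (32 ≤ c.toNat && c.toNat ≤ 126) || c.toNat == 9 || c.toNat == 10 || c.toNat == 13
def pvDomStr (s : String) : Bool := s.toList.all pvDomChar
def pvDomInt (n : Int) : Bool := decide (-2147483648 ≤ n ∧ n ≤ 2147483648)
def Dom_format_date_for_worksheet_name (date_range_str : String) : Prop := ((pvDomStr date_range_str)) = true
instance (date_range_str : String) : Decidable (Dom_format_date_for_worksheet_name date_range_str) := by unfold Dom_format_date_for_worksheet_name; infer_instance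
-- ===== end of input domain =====

-- B replaces A's twelve sequential whole-string replace passes by ONE left-to-right scan
-- substituting the first matching full month name at each position (objective: alternative).

-- ===== PORT A =====
-- literal port of A: a dict literal (distinct keys, so .items() is the literal order)
-- and one str.replace pass per month, in dict order.
def format_date_for_worksheet_name (date_range_str : String) : String :=
  let month_abbreviations : List (String × String) :=
    [("January", "Jan"), ("February", "Feb"), ("March", "Mar"), ("April", "Apr"),
     ("May", "May"), ("June", "Jun"), ("July", "Jul"), ("August", "Aug"),
     ("September", "Sep"), ("October", "Oct"), ("November", "Nov"), ("December", "Dec")]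
  List.foldl (fun formatted p => PySem.Str.replace formatted p.1 p.2) date_range_str month_abbreviations

-- ===== PORT B =====
-- B-side helpers: the months dict of Source B as (full, abbrev) char lists, in order
def pvMonths : List (List Char × List Char) :=
  [("January".toList, "Jan".toList), ("February".toList, "Feb".toList),
   ("March".toList, "Mar".toList), ("April".toList, "Apr".toList),
   ("May".toList, "May".toList), ("June".toList, "Jun".toList),
   ("July".toList, "Jul".toList), ("August".toList, "Aug".toList),
   ("September".toList, "Sep".toList), ("October".toList, "Oct".toList),
   ("November".toList, "Nov".toList), ("December".toList, "Dec".toList)]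

-- Source B's inner for/else: the first month of ps that matches at the current position
def pvFind (ps : List (List Char × List Char)) (s : List Char) : Option (List Char × List Char) :=
  ps.find? (fun p => p.1.isPrefixOf s)

-- Source B's while loop: emit the abbreviation and skip the matched month, else copy one char
def pvScan (ps : List (List Char × List Char)) : List Char → List Char
  | [] => []
  | c :: t =>
    match pvFind ps (c :: t) with
    | some p => p.2 ++ pvScan ps (t.drop (p.1.length - 1))
    | none => c :: pvScan ps t
  termination_by s => s.length
  decreasing_by
  · simp only [List.length_drop, List.length_cons]; omega
  · simp

def format_date_for_worksheet_name_alt (date_range_str : String) : String :=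
  String.ofList (pvScan pvMonths date_range_str.toList)

-- ===== PRECONDITION & SPEC =====
def Spec_format_date_for_worksheet_name (date_range_str : String) (out : String) : Prop := out = format_date_for_worksheet_name_alt date_range_str
instance (date_range_str : String) (out : String) : Decidable (Spec_format_date_for_worksheet_name date_range_str out) := by unfold Spec_format_date_for_worksheet_name; infer_instance

-- ===== CLAIM (what is proved, stated in full; the proofs are below) =====
def Claim_equal_format_date_for_worksheet_name : Prop := ∀ (date_range_str : String), Dom_format_date_for_worksheet_name date_range_str → Spec_format_date_for_worksheet_name date_range_str (format_date_for_worksheet_name date_range_str)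

-- ===== LEMMAS AND PROOFS =====

-- `pvBlocks a u`: a mismatch between a and u inside their common length, so a can
-- never be a prefix of u ++ Y, whatever Y is.
def pvBlocks (a u : List Char) : Prop :=
  ((List.range (min a.length u.length)).any (fun j => !(a.getD j ' ' == u.getD j ' '))) = true

lemma pvBlocks_not_prefix {a u : List Char} (h : pvBlocks a u) (Y : List Char) :
    ¬ a <+: u ++ Y := by
  rintro hp
  obtain ⟨j, hjmem, hneb⟩ := List.any_eq_true.mp h
  have hj : j < min a.length u.length := List.mem_range.mp hjmem
  have hne : a.getD j ' ' ≠ u.getD j ' ' := by simpa using hneb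
  have hja : j < a.length := lt_of_lt_of_le hj (min_le_left _ _)
  have hju : j < u.length := lt_of_lt_of_le hj (min_le_right _ _)
  have hjuy : j < (u ++ Y).length := by simp; omega
  have h1 : a[j] = (u ++ Y)[j] := hp.getElem hja
  have h2 : (u ++ Y)[j] = u[j] := List.getElem_append_left hju
  rw [List.getD_eq_getElem a ' ' hja, List.getD_eq_getElem u ' ' hju] at hne
  exact hne (h1.trans h2)

lemma pvScan_nil (ps : List (List Char × List Char)) : pvScan ps [] = [] := by
  simp [pvScan]

lemma pvScan_empty_pats (s : List Char) : pvScan [] s = s := by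
  induction s with
  | nil => exact pvScan_nil []
  | cons c t ih => rw [pvScan]; simp [pvFind, ih]


-- cons-step of pvScan in terms of pvFind
lemma pvScan_cons (ps : List (List Char × List Char)) (c : Char) (t : List Char) :
    pvScan ps (c :: t) =
      match pvFind ps (c :: t) with
      | some p => p.2 ++ pvScan ps (t.drop (p.1.length - 1))
      | none => c :: pvScan ps t := by
  rw [pvScan]

-- copying region: if every pattern is blocked at every offset inside u, the scan copies u
lemma pvScan_copy (ps : List (List Char × List Char)) (u X : List Char)
    (H : ∀ q ∈ ps, ∀ i < u.length, pvBlocks q.1 (u.drop i)) :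
    pvScan ps (u ++ X) = u ++ pvScan ps X := by
  induction u with
  | nil => simp
  | cons c u' ih =>
    have hfind : pvFind ps (c :: (u' ++ X)) = none := by
      apply List.find?_eq_none.mpr
      intro q hq hpre
      have hb := pvBlocks_not_prefix (H q hq 0 (by simp)) X
      simp only [List.drop_zero] at hb
      exact hb (by simpa using List.isPrefixOf_iff_prefix.mp hpre)
    have hstep := pvScan_cons ps c (u' ++ X)
    rw [hfind] at hstep
    rw [show c :: u' ++ X = c :: (u' ++ X) by simp, hstep,
      ih (fun q hq i hi => by simpa using H q hq (i+1) (by simpa using hi))]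
    simp

-- single-pattern scan steps
lemma pvScan_single_pos (old new : List Char) (c : Char) (t : List Char)
    (h : old.isPrefixOf (c :: t) = true) :
    pvScan [(old, new)] (c :: t) = new ++ pvScan [(old, new)] (t.drop (old.length - 1)) := by
  rw [pvScan_cons]
  simp [pvFind, List.find?, h]

lemma pvScan_single_neg (old new : List Char) (c : Char) (t : List Char)
    (h : old.isPrefixOf (c :: t) = false) :
    pvScan [(old, new)] (c :: t) = c :: pvScan [(old, new)] t := by
  rw [pvScan_cons]
  simp [pvFind, List.find?, h]

-- fuel-based PySem.Chars.replace.go computes the single-pattern scan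
lemma pvReplace_go_eq (old new : List Char) (hold : old ≠ []) :
    ∀ (fuel : Nat) (l acc : List Char), l.length ≤ fuel →
      PySem.Chars.replace.go old new fuel l acc = acc.reverse ++ pvScan [(old, new)] l := by
  intro fuel
  induction fuel with
  | zero =>
    intro l acc hl
    have : l = [] := List.eq_nil_of_length_eq_zero (Nat.le_zero.mp hl)
    subst this
    simp [PySem.Chars.replace.go, pvScan_nil]
  | succ n ih =>
    intro l acc hl
    match l with
    | [] => simp [PySem.Chars.replace.go, pvScan_nil]
    | c :: t =>
      rw [PySem.Chars.replace.go]
      by_cases h : old.isPrefixOf (c :: t) = true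
      · rw [if_pos h, pvScan_single_pos old new c t h]
        have hlen : (List.drop old.length (c :: t)).length ≤ n := by
          simp only [List.length_drop, List.length_cons] at *
          have : 1 ≤ old.length := by
            cases old with
            | nil => exact absurd rfl hold
            | cons _ _ => simp
          omega
        rw [ih _ _ hlen]
        have : List.drop old.length (c :: t) = t.drop (old.length - 1) := by
          cases old with
          | nil => exact absurd rfl hold
          | cons o os => simp
        rw [this]
        simp
      · rw [if_neg h, pvScan_single_neg old new c t (Bool.not_eq_true _ ▸ eq_false_of_ne_true h)]
        rw [ih t (c :: acc) (by simpa using Nat.lt_succ_iff.mp (by simpa using hl))]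
        simp

-- PySem.Chars.replace is exactly the single-pattern scan (for a nonempty pattern)
lemma pvReplace_eq_scan (s old new : List Char) (hold : old ≠ []) :
    PySem.Chars.replace s old new = pvScan [(old, new)] s := by
  rw [PySem.Chars.replace]
  rw [if_neg (by simpa [List.isEmpty_iff] using hold)]
  simpa using pvReplace_go_eq old new hold s.length s [] le_rfl

-- a strict suffix of a month name that becomes a prefix of the single-pattern-scanned
-- string was already a prefix of the original string (nothing new is created)
lemma pvScan_no_create (p : List Char × List Char) (q1 : List Char)
    (h3 : ∀ i, 1 ≤ i → i < q1.length → pvBlocks (q1.drop i) p.2) :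
    ∀ (n : Nat) (s : List Char) (i : Nat), s.length ≤ n → 1 ≤ i → i < q1.length →
      q1.drop i <+: pvScan [p] s → q1.drop i <+: s := by
  intro n
  induction n with
  | zero =>
    intro s i hl _ hi hp
    have hs : s = [] := List.eq_nil_of_length_eq_zero (Nat.le_zero.mp hl)
    subst hs
    rw [pvScan_nil] at hp
    exact hp
  | succ n ih =>
    intro s i hl h1 hi hp
    match s with
    | [] => rw [pvScan_nil] at hp; exact hp
    | c :: t =>
      by_cases h : p.1.isPrefixOf (c :: t) = true
      · rw [show pvScan [p] (c :: t) = pvScan [(p.1, p.2)] (c :: t) from rfl,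
          pvScan_single_pos p.1 p.2 c t h] at hp
        exact absurd hp (pvBlocks_not_prefix (h3 i h1 hi) _)
      · rw [show pvScan [p] (c :: t) = pvScan [(p.1, p.2)] (c :: t) from rfl,
          pvScan_single_neg p.1 p.2 c t (Bool.not_eq_true _ ▸ eq_false_of_ne_true h)] at hp
        have hdropi : q1.drop i = q1[i] :: q1.drop (i + 1) :=
          (List.drop_eq_getElem_cons hi).symm ▸ rfl
        rw [hdropi] at hp ⊢
        obtain ⟨hc, hrest⟩ := by
          rw [List.cons_prefix_cons] at hp
          exact hp
        rw [List.cons_prefix_cons]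
        refine ⟨hc, ?_⟩
        by_cases hlast : i + 1 < q1.length
        · exact ih t (i + 1) (by simpa using Nat.lt_succ_iff.mp (by simpa using hl))
            (by omega) hlast hrest
        · have : q1.drop (i + 1) = [] := List.drop_eq_nil_of_le (by omega)
          rw [this]
          exact List.nil_prefix

-- one pass for p followed by a scan for qs = one scan for p :: qs
lemma pvStep (p : List Char × List Char) (qs : List (List Char × List Char))
    (hne : ∀ q ∈ p :: qs, q.1 ≠ [])
    (hnodup : (p :: qs).Nodup)
    (h1 : ∀ a ∈ p :: qs, ∀ b ∈ p :: qs, a ≠ b → ∀ i < b.1.length, pvBlocks a.1 (b.1.drop i))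
    (h2 : ∀ q ∈ qs, ∀ i < p.2.length, pvBlocks q.1 (p.2.drop i))
    (h3 : ∀ q ∈ qs, ∀ i, 1 ≤ i → i < q.1.length → pvBlocks (q.1.drop i) p.2) :
    ∀ (n : Nat) (s : List Char), s.length ≤ n →
      pvScan qs (pvScan [p] s) = pvScan (p :: qs) s := by
  intro n
  induction n with
  | zero =>
    intro s hl
    have hs : s = [] := List.eq_nil_of_length_eq_zero (Nat.le_zero.mp hl)
    subst hs
    simp [pvScan_nil]
  | succ n ih =>
    intro s hl
    match s with
    | [] => simp [pvScan_nil]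
    | c :: t =>
      by_cases hp : p.1.isPrefixOf (c :: t) = true
      · -- p matches here: both sides emit p.2 and continue after the match
        rw [show pvScan [p] (c :: t) = pvScan [(p.1, p.2)] (c :: t) from rfl,
          pvScan_single_pos p.1 p.2 c t hp,
          pvScan_copy qs p.2 _ h2]
        rw [pvScan_cons (p :: qs) c t,
          show pvFind (p :: qs) (c :: t) = some p from List.find?_cons_of_pos hp]
        simp only
        rw [ih (t.drop (p.1.length - 1)) (by simp only [List.length_drop, List.length_cons] at *; omega)]
      · have hpB : (p.1.isPrefixOf (c :: t)) = false := Bool.not_eq_true _ ▸ eq_false_of_ne_true hp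
        have hconsfind : pvFind (p :: qs) (c :: t) = pvFind qs (c :: t) :=
          List.find?_cons_of_neg (by simp [hpB])
        cases hf : pvFind qs (c :: t) with
        | none =>
          -- no month matches here: both sides copy c
          have hnone2 : pvFind qs (c :: pvScan [p] t) = none := by
            apply List.find?_eq_none.mpr
            intro q hq hpre
            have hqpre : q.1 <+: c :: pvScan [p] t := by
              simpa using List.isPrefixOf_iff_prefix.mp (by simpa using hpre)
            have hqne : q.1 ≠ [] := hne q (List.mem_cons_of_mem _ hq)
            have hqorig : q.1 <+: c :: t := by
              cases hq1 : q.1 with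
              | nil => exact absurd hq1 hqne
              | cons d q' =>
                rw [hq1] at hqpre
                rw [List.cons_prefix_cons] at hqpre
                obtain ⟨hdc, hq'⟩ := hqpre
                rw [List.cons_prefix_cons]
                refine ⟨hdc, ?_⟩
                by_cases hq'len : 1 < q.1.length
                · have hdrop : q.1.drop 1 <+: t := by
                    apply pvScan_no_create p q.1 (h3 q hq) t.length t 1 le_rfl le_rfl hq'len
                    rw [hq1]
                    simpa using hq'
                  rw [hq1] at hdrop
                  simpa using hdrop
                · have hq'nil : q' = [] := by
                    have hlen := congrArg List.length hq1
                    simp at hlen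
                    exact List.eq_nil_of_length_eq_zero (by omega)
                  rw [hq'nil]
                  exact List.nil_prefix
            exact absurd (List.isPrefixOf_iff_prefix.mpr hqorig)
              (by simpa using List.find?_eq_none.mp hf q hq)
          rw [show pvScan [p] (c :: t) = pvScan [(p.1, p.2)] (c :: t) from rfl,
            pvScan_single_neg p.1 p.2 c t hpB,
            show pvScan [(p.1, p.2)] t = pvScan [p] t from rfl,
            pvScan_cons qs (c := c) (t := pvScan [p] t), hnone2]
          simp only
          rw [ih t (by simpa using Nat.lt_succ_iff.mp (by simpa using hl))]
          rw [pvScan_cons (p :: qs) c t, hconsfind, hf]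
        | some q =>
          -- a later month q matches here; the p-pass copies it unchanged
          obtain ⟨hqpred, as, bs, hqs, has⟩ := List.find?_eq_some_iff_append.mp hf
          have hqmem : q ∈ qs := by rw [hqs]; simp
          have hqne : q.1 ≠ [] := hne q (List.mem_cons_of_mem _ hqmem)
          have hpq : p ≠ q := by
            intro h
            exact (List.nodup_cons.mp hnodup).1 (h ▸ hqmem)
          obtain ⟨r, hr⟩ := List.isPrefixOf_iff_prefix.mp hqpred
          cases hq1 : q.1 with
          | nil => exact absurd hq1 hqne
          | cons d ds =>
            rw [hq1] at hr
            have hdc : d = c := by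
              have := congrArg (List.headD · ' ') hr
              simpa using this
            have ht : t = ds ++ r := by
              have := congrArg List.tail hr
              simpa using this.symm
            -- the p-pass copies the q.1 region verbatim
            have hcopy : pvScan [(p.1, p.2)] ((d :: ds) ++ r) = (d :: ds) ++ pvScan [(p.1, p.2)] r := by
              apply pvScan_copy
              intro pp hpp i hi
              have hpp' : pp = (p.1, p.2) := by simpa using hpp
              subst hpp'
              simp only
              have hb := h1 p (List.mem_cons_self) q (List.mem_cons_of_mem _ hqmem) hpq i (by rw [hq1]; exact hi)
              rw [hq1] at hb
              exact hb
            have hct : c :: t = (d :: ds) ++ r := by rw [ht, hdc]; simp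
            -- right-hand side first
            rw [pvScan_cons (p :: qs) c t, hconsfind, hf]
            simp only
            rw [hq1]
            simp only [List.length_cons, Nat.add_sub_cancel]
            rw [show t.drop ds.length = r by rw [ht]; exact List.drop_left]
            -- left-hand side
            rw [show pvScan [p] (c :: t) = pvScan [(p.1, p.2)] (c :: t) from rfl, hct, hcopy]
            -- the qs-scan still finds q first on the copied region
            have hfind2 : pvFind qs ((d :: ds) ++ pvScan [(p.1, p.2)] r) = some q := by
              apply List.find?_eq_some_iff_append.mpr
              refine ⟨?_, as, bs, hqs, ?_⟩
              · rw [List.isPrefixOf_iff_prefix, hq1]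
                exact List.prefix_append _ _
              · intro a ha
                have haq : a ≠ q := by
                  intro h
                  have hnd : (as ++ q :: bs).Nodup := hqs ▸ (List.nodup_cons.mp hnodup).2
                  subst h; exact (List.nodup_append.mp hnd).2.2 a ha a List.mem_cons_self rfl
                have hamem : a ∈ qs := by rw [hqs]; exact List.mem_append.mpr (Or.inl ha)
                have hblock := h1 a (List.mem_cons_of_mem _ hamem) q (List.mem_cons_of_mem _ hqmem) haq 0 (by rw [hq1]; simp)
                rw [hq1] at hblock
                simp only [List.drop_zero] at hblock
                have hnp := pvBlocks_not_prefix hblock (pvScan [(p.1, p.2)] r)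
                simp only [Bool.not_eq_true']
                rw [← Bool.not_eq_true]
                intro hx
                exact hnp (List.isPrefixOf_iff_prefix.mp hx)
            rw [show (d :: ds) ++ pvScan [(p.1, p.2)] r = d :: (ds ++ pvScan [(p.1, p.2)] r) by simp] at hfind2
            rw [show (d :: ds) ++ pvScan [(p.1, p.2)] r = d :: (ds ++ pvScan [(p.1, p.2)] r) by simp]
            rw [pvScan_cons qs d (ds ++ pvScan [(p.1, p.2)] r), hfind2]
            simp only
            rw [hq1]
            simp only [List.length_cons, Nat.add_sub_cancel, List.drop_left]
            rw [show pvScan [(p.1, p.2)] r = pvScan [p] r from rfl,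
              ih r (by rw [ht] at hl; simp only [List.length_append, List.length_cons] at hl; omega)]

-- one replace pass per pattern, in order = one combined scan
lemma pvFold_eq_scan (ps : List (List Char × List Char))
    (hne : ∀ q ∈ ps, q.1 ≠ [])
    (hnodup : ps.Nodup)
    (h1 : ∀ a ∈ ps, ∀ b ∈ ps, a ≠ b → ∀ i < b.1.length, pvBlocks a.1 (b.1.drop i))
    (h2 : ∀ a ∈ ps, ∀ b ∈ ps, a ≠ b → ∀ i < a.2.length, pvBlocks b.1 (a.2.drop i))
    (h3 : ∀ a ∈ ps, ∀ b ∈ ps, ∀ i, 1 ≤ i → i < b.1.length → pvBlocks (b.1.drop i) a.2) :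
    ∀ s : List Char, List.foldl (fun acc p => pvScan [p] acc) s ps = pvScan ps s := by
  induction ps with
  | nil => intro s; simp [pvScan_empty_pats]
  | cons p qs ih =>
    intro s
    have hp : p ∈ p :: qs := List.mem_cons_self
    have hsub : ∀ q ∈ qs, q ∈ p :: qs := fun q hq => List.mem_cons_of_mem _ hq
    have hpnot : p ∉ qs := (List.nodup_cons.mp hnodup).1
    rw [List.foldl_cons,
      ih (fun q hq => hne q (hsub q hq)) (List.nodup_cons.mp hnodup).2
        (fun a ha b hb hab => h1 a (hsub a ha) b (hsub b hb) hab)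
        (fun a ha b hb hab => h2 a (hsub a ha) b (hsub b hb) hab)
        (fun a ha b hb => h3 a (hsub a ha) b (hsub b hb)) (pvScan [p] s)]
    exact pvStep p qs hne hnodup h1
      (fun q hq => h2 p hp q (hsub q hq) (fun h => hpnot (h ▸ hq)))
      (fun q hq => h3 p hp q (hsub q hq))
      s.length s le_rfl

-- the finite facts about the twelve month names (checked by decide):
-- names nonempty and distinct; no name matches inside another name (at any offset,
-- whatever follows); no name matches inside an abbreviation; no strict suffix of a
-- name is matched by an abbreviation
lemma pvMonths_ne : ∀ q ∈ pvMonths, q.1 ≠ [] := by decide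
lemma pvMonths_nodup : pvMonths.Nodup := by decide
lemma pvMonths_h1 : ∀ a ∈ pvMonths, ∀ b ∈ pvMonths, a ≠ b → ∀ i < b.1.length, pvBlocks a.1 (b.1.drop i) := by simp only [pvBlocks]; decide
lemma pvMonths_h2 : ∀ a ∈ pvMonths, ∀ b ∈ pvMonths, a ≠ b → ∀ i < a.2.length, pvBlocks b.1 (a.2.drop i) := by simp only [pvBlocks]; decide
lemma pvMonths_h3 : ∀ a ∈ pvMonths, ∀ b ∈ pvMonths, ∀ i, 1 ≤ i → i < b.1.length → pvBlocks (b.1.drop i) a.2 := by simp only [pvBlocks]; decide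

-- A's string-level fold of Str.replace, moved to the char-list level
lemma pvFoldS (ps : List (String × String)) (h : ∀ p ∈ ps, p.1.toList ≠ []) :
    ∀ s : String, List.foldl (fun acc p => PySem.Str.replace acc p.1 p.2) s ps
      = String.ofList (List.foldl (fun acc p => pvScan [p] acc) s.toList
          (ps.map (fun p => (p.1.toList, p.2.toList)))) := by
  induction ps with
  | nil => intro s; simp [String.ofList_toList]
  | cons p qs ih =>
    intro s
    rw [List.foldl_cons, ih (fun q hq => h q (List.mem_cons_of_mem _ hq)),
      List.map_cons, List.foldl_cons]
    congr 1
    rw [show (PySem.Str.replace s p.1 p.2).toList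
        = PySem.Chars.replace s.toList p.1.toList p.2.toList from PySem.Str.toList_replace s p.1 p.2,
      pvReplace_eq_scan s.toList p.1.toList p.2.toList (h p List.mem_cons_self)]

-- ===== VERDICT (by name: the statement is the Claim_ definition above) =====
theorem format_date_for_worksheet_name_spec : Claim_equal_format_date_for_worksheet_name := by
  intro s _
  unfold Spec_format_date_for_worksheet_name format_date_for_worksheet_name format_date_for_worksheet_name_alt
  rw [pvFoldS _ (by decide) s,
    show ([("January", "Jan"), ("February", "Feb"), ("March", "Mar"), ("April", "Apr"),
      ("May", "May"), ("June", "Jun"), ("July", "Jul"), ("August", "Aug"),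
      ("September", "Sep"), ("October", "Oct"), ("November", "Nov"), ("December", "Dec")]
        : List (String × String)).map (fun p => (p.1.toList, p.2.toList)) = pvMonths by decide,
    pvFold_eq_scan pvMonths pvMonths_ne pvMonths_nodup pvMonths_h1 pvMonths_h2 pvMonths_h3 s.toList]
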